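-- pv_equiv track=rewrite | github.com/posl/comment_recommendation | script/mod_gen/3_time/zh/242_C/5.py | solve
-- ===== SOURCE A (Python) =====
-- def solve(N):
--     mod = 998244353
--     dp = [[0] * 10 for _ in range(N + 1)]
--     for i in range(1, 10):
--         dp[1][i] = 1
--     for i in range(2, N + 1):
--         for j in range(10):
--             for k in range(10):
--                 if abs(j - k) <= 1:
--                     dp[i][j] += dp[i - 1][k]
--                     dp[i][j] %= mod
--     return sum(dp[N]) % mod
-- ===== SOURCE B (Python) =====
-- def solve(N):
--     mod = 998244353
--     M = [[1 if abs(j - k) <= 1 else 0 for k in range(10)] for j in range(10)]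
--
--     def matmul(A, B):
--         return [[sum(A[j][t] * B[t][k] for t in range(10)) % mod for k in range(10)]
--                 for j in range(10)]
--
--     # R = M ** (N - 1) by binary exponentiation
--     R = [[1 if j == k else 0 for k in range(10)] for j in range(10)]
--     P = M
--     e = N - 1
--     while e > 0:
--         if e & 1:
--             R = matmul(R, P)
--         P = matmul(P, P)
--         e >>= 1
--     v = [0] + [1] * 9  # the length-1 row
--     w = [sum(v[k] * R[k][j] for k in range(10)) % mod for j in range(10)]
--     return sum(w) % mod
-- ===== Notes on version B (the rewrite author's own statement) =====
-- stated objective: faster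
-- what changed: Replaced the O(N) row-by-row DP over an (N+1)x10 table with binary exponentiation of the fixed 10x10 adjacency transition matrix mod 998244353.
-- outside the precondition, e.g. on solve(0): A raises IndexError, B returns 9
import Mathlib
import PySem

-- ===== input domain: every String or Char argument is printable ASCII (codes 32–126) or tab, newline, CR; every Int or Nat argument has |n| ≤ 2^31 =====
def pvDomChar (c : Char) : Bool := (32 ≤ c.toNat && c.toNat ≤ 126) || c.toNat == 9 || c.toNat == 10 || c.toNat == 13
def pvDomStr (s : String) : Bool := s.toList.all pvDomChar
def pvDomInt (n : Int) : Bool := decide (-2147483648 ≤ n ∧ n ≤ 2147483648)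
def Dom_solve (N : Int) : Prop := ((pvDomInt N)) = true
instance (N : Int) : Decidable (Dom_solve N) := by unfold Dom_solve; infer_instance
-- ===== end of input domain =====

-- B replaces A's O(N) row-by-row DP with binary exponentiation of the fixed 10x10
-- adjacency transition matrix mod 998244353 (objective: faster, O(log N)).

-- ===== PORT A =====
-- the inner double loop computing row i from row i-1: for each j, fold over k with += and %= mod
def stepA (prev : List Int) : List Int :=
  (List.finRange 10).map (fun (j : Fin 10) =>
    (List.finRange 10).foldl
      (fun (acc : Int) (k : Fin 10) =>
        if |(j : Int) - (k : Int)| ≤ 1 then (acc + prev.getD (k : Nat) 0) % 998244353 else acc) 0)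

-- A's row dp[1]: entries 1..9 set to 1
def row1A : List Int :=
  (List.finRange 10).map (fun (i : Fin 10) => if i = 0 then (0 : Int) else 1)

-- the outer loop 'for i in range(2, N+1)', carrying the current row
def loopA : Nat → List Int → List Int
  | 0, row => row
  | m + 1, row => loopA m (stepA row)

def solve (N : Int) : Int :=
  ((List.finRange 10).foldl
      (fun (acc : Int) (j : Fin 10) => acc + (loopA (N.toNat - 1) row1A).getD (j : Nat) 0) 0)
    % 998244353

-- ===== PORT B =====
-- entry A[j][k] of a 10x10 matrix stored as a list of row lists (as in Source B)
def eM (A : List (List Int)) (j k : Fin 10) : Int := (A.getD (j : Nat) []).getD (k : Nat) 0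

def matB : List (List Int) :=
  (List.finRange 10).map (fun (j : Fin 10) =>
    (List.finRange 10).map (fun (k : Fin 10) =>
      if |(j : Int) - (k : Int)| ≤ 1 then (1 : Int) else 0))

def idB : List (List Int) :=
  (List.finRange 10).map (fun (j : Fin 10) =>
    (List.finRange 10).map (fun (k : Fin 10) => if j = k then (1 : Int) else 0))

def mulB (A B : List (List Int)) : List (List Int) :=
  (List.finRange 10).map (fun (j : Fin 10) =>
    (List.finRange 10).map (fun (k : Fin 10) =>
      (∑ t : Fin 10, eM A j t * eM B t k) % 998244353))

-- the while-loop of Source B: square-and-multiply on the exponent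
def powB (R P : List (List Int)) (e : Nat) : List (List Int) :=
  if h : e = 0 then R
  else powB (if e % 2 = 1 then mulB R P else R) (mulB P P) (e / 2)
termination_by e
decreasing_by exact Nat.div_lt_self (Nat.pos_of_ne_zero h) one_lt_two

def vB (k : Fin 10) : Int := if k = 0 then 0 else 1

def solve_alt (N : Int) : Int :=
  let R := powB idB matB (N - 1).toNat
  (∑ j : Fin 10, (∑ k : Fin 10, vB k * eM R k j) % 998244353) % 998244353

-- ===== PRECONDITION & SPEC =====
-- A writes into the second row of a table that has only N+1 rows, so it raises IndexError for every non-positive N.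
def Pre_solve (N : Int) : Prop := 1 ≤ N
instance (N : Int) : Decidable (Pre_solve N) := by unfold Pre_solve; infer_instance
def pvWitness_solve : Int := (3)

def Spec_solve (N : Int) (out : Int) : Prop := out = solve_alt N
instance (N : Int) (out : Int) : Decidable (Spec_solve N out) := by unfold Spec_solve; infer_instance

-- ===== CLAIM (what is proved, stated in full; the proofs are below) =====
def Claim_equal_solve : Prop := ∀ (N : Int), Dom_solve N → Pre_solve N → Spec_solve N (solve N)

-- ===== LEMMAS AND PROOFS =====

-- the transition matrix over ZMod 998244353
def Mz : Matrix (Fin 10) (Fin 10) (ZMod 998244353) :=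
  Matrix.of fun j k => if |(j : Int) - (k : Int)| ≤ 1 then 1 else 0

def v1z (k : Fin 10) : ZMod 998244353 := if k = 0 then 0 else 1

-- a stored row, read in ZMod
def zr (l : List Int) (j : Fin 10) : ZMod 998244353 := ((l.getD (j : Nat) 0 : Int) : ZMod 998244353)

def castM (A : List (List Int)) : Matrix (Fin 10) (Fin 10) (ZMod 998244353) :=
  Matrix.of fun j k => ((eM A j k : Int) : ZMod 998244353)

lemma cast_mod (a : Int) :
    (((a % (998244353 : Int)) : Int) : ZMod 998244353) = (a : ZMod 998244353) := by
  exact_mod_cast ZMod.intCast_mod a 998244353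

lemma getD_map_finRange {α : Type} (f : Fin 10 → α) (d : α) (j : Fin 10) :
    ((List.finRange 10).map f).getD (j : Nat) d = f j := by
  rw [List.getD_eq_getElem _ _ (by simp)]
  simp [Fin.cast]

lemma eM_tab (f : Fin 10 → Fin 10 → Int) (j k : Fin 10) :
    eM ((List.finRange 10).map (fun j => (List.finRange 10).map (fun k => f j k))) j k
      = f j k := by
  rw [eM, getD_map_finRange, getD_map_finRange]

lemma castM_mulB (A B : List (List Int)) : castM (mulB A B) = castM A * castM B := by
  ext j k
  simp only [castM, mulB, Matrix.mul_apply, Matrix.of_apply,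
    eM_tab (fun j k => (∑ t : Fin 10, eM A j t * eM B t k) % 998244353), cast_mod]
  push_cast
  rfl

lemma castM_idB : castM idB = 1 := by
  ext j k
  simp only [castM, idB, Matrix.of_apply,
    eM_tab (fun j k => if j = k then (1 : Int) else 0)]
  simp [Matrix.one_apply, apply_ite (fun z : Int => (z : ZMod 998244353))]

lemma castM_matB : castM matB = Mz := by
  ext j k
  simp only [castM, matB, Matrix.of_apply,
    eM_tab (fun j k => if |(j : Int) - (k : Int)| ≤ 1 then (1 : Int) else 0)]
  simp [Mz, apply_ite (fun z : Int => (z : ZMod 998244353))]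

lemma castM_powB (e : Nat) : ∀ (R P : List (List Int)),
    castM (powB R P e) = castM R * castM P ^ e := by
  induction e using Nat.strong_induction_on with
  | _ e ih =>
    intro R P
    by_cases h : e = 0
    · subst h; simp [powB]
    · rw [powB]
      simp only [h, dite_false]
      rw [ih (e / 2) (Nat.div_lt_self (Nat.pos_of_ne_zero h) one_lt_two)]
      have hsplit : e = e % 2 + 2 * (e / 2) := (Nat.mod_add_div e 2).symm
      have hP2 : castM (mulB P P) = castM P ^ 2 := by rw [castM_mulB, sq]
      rcases Nat.mod_two_eq_zero_or_one e with h2 | h2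
      · rw [if_neg (by omega : ¬ e % 2 = 1)]
        rw [hP2, ← pow_mul]
        conv_rhs => rw [hsplit, h2]
        simp
      · rw [if_pos h2, castM_mulB]
        rw [hP2, ← pow_mul, mul_assoc, ← pow_succ']
        conv_rhs => rw [hsplit, h2]
        ring_nf

-- cast of A's inner fold: the conditional mod-accumulation is a filtered sum
lemma foldl_mod_cast (f : Fin 10 → Int) (c : Fin 10 → Prop) [DecidablePred c] :
    ∀ (l : List (Fin 10)) (a : Int),
    (((l.foldl (fun acc k => if c k then (acc + f k) % 998244353 else acc) a) : Int)
      : ZMod 998244353)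
    = (a : ZMod 998244353) + (l.map fun k => if c k then ((f k : Int) : ZMod 998244353) else 0).sum := by
  intro l
  induction l with
  | nil => intro a; simp
  | cons h t ih =>
    intro a
    by_cases hc : c h
    · simp only [List.foldl_cons, List.map_cons, List.sum_cons, if_pos hc, ih, cast_mod]
      push_cast; ring
    · simp only [List.foldl_cons, List.map_cons, List.sum_cons, if_neg hc, ih]
      ring

lemma stepA_cast (prev : List Int) (j : Fin 10) :
    zr (stepA prev) j = ∑ k : Fin 10, Mz j k * zr prev k := by
  rw [zr, stepA, getD_map_finRange, foldl_mod_cast (fun k => prev.getD (k : Nat) 0)]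
  rw [Fin.sum_univ_def]
  push_cast
  rw [zero_add]
  simp [Mz, ite_mul, zr]

lemma Mz_symm (j k : Fin 10) : Mz j k = Mz k j := by
  simp [Mz, abs_sub_comm]

lemma loopA_cast (m : Nat) : ∀ (l : List Int) (j : Fin 10),
    zr (loopA m l) j = ∑ k : Fin 10, zr l k * (Mz ^ m) k j := by
  induction m with
  | zero =>
    intro l j
    simp [loopA, Matrix.one_apply, mul_ite, mul_one, mul_zero,
      Finset.sum_ite_eq' Finset.univ j (zr l)]
  | succ m ih =>
    intro l j
    show zr (loopA m (stepA l)) j = _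
    rw [ih]
    calc ∑ k : Fin 10, zr (stepA l) k * (Mz ^ m) k j
        = ∑ k : Fin 10, (∑ t : Fin 10, Mz k t * zr l t) * (Mz ^ m) k j := by
          simp only [stepA_cast]
      _ = ∑ t : Fin 10, zr l t * ∑ k : Fin 10, Mz t k * (Mz ^ m) k j := by
          simp only [Finset.sum_mul, Finset.mul_sum]
          rw [Finset.sum_comm]
          apply Finset.sum_congr rfl; intro t _
          apply Finset.sum_congr rfl; intro k _
          rw [Mz_symm k t]; ring
      _ = ∑ t : Fin 10, zr l t * (Mz ^ (m + 1)) t j := by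
          simp only [pow_succ', Matrix.mul_apply]

lemma zr_row1A (k : Fin 10) : zr row1A k = v1z k := by
  rw [zr, row1A, getD_map_finRange]
  simp [v1z, apply_ite (fun z : Int => (z : ZMod 998244353))]

-- ===== VERDICT (by name: the statement is the Claim_ definition above) =====
theorem solve_spec : Claim_equal_solve := by
  intro N _ hpre
  unfold Pre_solve at hpre
  unfold Spec_solve
  set m : Nat := (N - 1).toNat with hm
  have hn : N.toNat - 1 = m := by omega
  rw [solve, solve_alt]
  rw [show ((List.finRange 10).foldl
        (fun (acc : Int) (j : Fin 10) => acc + (loopA (N.toNat - 1) row1A).getD (j : Nat) 0) 0 : Int)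
        = 0 + ((List.finRange 10).map
            (fun (j : Fin 10) => (loopA (N.toNat - 1) row1A).getD (j : Nat) 0)).sum from
      PySem.List.foldl_add _ _ 0]
  have key : ((0 + ((List.finRange 10).map
          (fun (j : Fin 10) => (loopA (N.toNat - 1) row1A).getD (j : Nat) 0)).sum : Int)
        : ZMod 998244353)
      = ((∑ j : Fin 10, (∑ k : Fin 10, vB k * eM (powB idB matB m) k j) % 998244353 : Int)
          : ZMod 998244353) := by
    push_cast
    rw [List.map_map]
    rw [show ((Int.cast ∘ fun (j : Fin 10) => (loopA (N.toNat - 1) row1A).getD (j : Nat) 0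
          : Fin 10 → ZMod 998244353))
          = fun j => zr (loopA (N.toNat - 1) row1A) j from rfl]
    rw [← Fin.sum_univ_def (fun j => zr (loopA (N.toNat - 1) row1A) j)]
    rw [zero_add]
    have hR : castM (powB idB matB m) = Mz ^ m := by
      rw [castM_powB, castM_idB, castM_matB, one_mul]
    calc ∑ j : Fin 10, zr (loopA (N.toNat - 1) row1A) j
        = ∑ j : Fin 10, ∑ k : Fin 10, v1z k * (Mz ^ m) k j := by
          apply Finset.sum_congr rfl; intro j _
          rw [hn, loopA_cast]
          exact Finset.sum_congr rfl fun k _ => by rw [zr_row1A]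
      _ = ∑ j : Fin 10, ((((∑ k : Fin 10, vB k * eM (powB idB matB m) k j) % 998244353 : Int))
            : ZMod 998244353) := by
          apply Finset.sum_congr rfl; intro j _
          rw [cast_mod]
          push_cast
          apply Finset.sum_congr rfl; intro k _
          have h1 : ((vB k : Int) : ZMod 998244353) = v1z k := by
            simp [vB, v1z, apply_ite (fun z : Int => (z : ZMod 998244353))]
          have h2 : ((eM (powB idB matB m) k j : Int) : ZMod 998244353) = (Mz ^ m) k j := by
            rw [← hR]; rfl
          rw [h1, h2]
  have := (ZMod.intCast_eq_intCast_iff'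
    (0 + ((List.finRange 10).map
        (fun (j : Fin 10) => (loopA (N.toNat - 1) row1A).getD (j : Nat) 0)).sum)
    (∑ j : Fin 10, (∑ k : Fin 10, vB k * eM (powB idB matB m) k j) % 998244353)
    998244353).mp key
  exact_mod_cast this
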